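-- pv_equiv track=rewrite | github.com/SunLing134340/Accelerating_Automatic_Search | 1.Source-Code/1.PRESENT/3.Linear-Active-Sbox/SearchWithCadical.py | CountClausesInRoundFunction
-- ===== SOURCE A (Python) =====
-- def CountClausesInRoundFunction(Round, ActiveSbox, clause_num):
--     count = clause_num
--     # Nonzero input
--     count += 1
--     # Cluases for Sbox
--     for r in range(Round):
--         for i in range(16):
--             for j in range(39):
--                 count += 1
--     return count
-- ===== SOURCE B (Python) =====
-- def CountClausesInRoundFunction(Round, ActiveSbox, clause_num):
--     # closed form: the triple loop adds 16*39 = 624 clauses per round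
--     return clause_num + 1 + 624 * max(Round, 0)
-- ===== Notes on version B (the rewrite author's own statement) =====
-- stated objective: faster
-- what changed: Replaced the triple nested loop (Round*16*39 unit increments) by the closed-form expression clause_num + 1 + 624*max(Round, 0).
import Mathlib
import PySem

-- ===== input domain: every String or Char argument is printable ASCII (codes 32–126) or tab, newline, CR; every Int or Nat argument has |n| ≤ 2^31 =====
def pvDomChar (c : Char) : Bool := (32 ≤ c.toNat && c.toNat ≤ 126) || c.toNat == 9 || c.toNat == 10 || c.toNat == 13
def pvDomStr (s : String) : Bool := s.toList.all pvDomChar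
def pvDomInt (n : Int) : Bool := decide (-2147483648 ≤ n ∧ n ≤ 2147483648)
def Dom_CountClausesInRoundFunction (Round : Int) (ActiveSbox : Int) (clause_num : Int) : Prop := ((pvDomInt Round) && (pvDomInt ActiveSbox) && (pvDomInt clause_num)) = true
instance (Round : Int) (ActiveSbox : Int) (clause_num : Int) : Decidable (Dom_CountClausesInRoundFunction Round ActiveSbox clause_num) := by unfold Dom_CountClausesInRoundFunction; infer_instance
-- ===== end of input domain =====

-- B replaces A's triple nested counting loop by the closed form clause_num + 1 + 624*max(Round,0) (O(1) vs O(Round)).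


-- ===== PORT A =====
def CountClausesInRoundFunction (Round : Int) (ActiveSbox : Int) (clause_num : Int) : Int :=
  -- count = clause_num; count += 1
  let count := clause_num + 1
  -- for r in range(Round): for i in range(16): for j in range(39): count += 1
  (PySem.List.pyRange 0 Round 1).foldl
    (fun c _r =>
      (PySem.List.pyRange 0 16 1).foldl
        (fun c2 _i =>
          (PySem.List.pyRange 0 39 1).foldl (fun c3 _j => c3 + 1) c2)
        c)
    count

-- ===== PORT B =====
def CountClausesInRoundFunction_alt (Round : Int) (ActiveSbox : Int) (clause_num : Int) : Int :=
  clause_num + 1 + 624 * max Round 0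

-- ===== PRECONDITION & SPEC =====
def Spec_CountClausesInRoundFunction (Round : Int) (ActiveSbox : Int) (clause_num : Int) (out : Int) : Prop := out = CountClausesInRoundFunction_alt Round ActiveSbox clause_num
instance (Round : Int) (ActiveSbox : Int) (clause_num : Int) (out : Int) : Decidable (Spec_CountClausesInRoundFunction Round ActiveSbox clause_num out) := by unfold Spec_CountClausesInRoundFunction; infer_instance

-- ===== CLAIM (what is proved, stated in full; the proofs are below) =====
def Claim_equal_CountClausesInRoundFunction : Prop := ∀ (Round : Int) (ActiveSbox : Int) (clause_num : Int), Dom_CountClausesInRoundFunction Round ActiveSbox clause_num → Spec_CountClausesInRoundFunction Round ActiveSbox clause_num (CountClausesInRoundFunction Round ActiveSbox clause_num)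

-- ===== LEMMAS AND PROOFS =====

-- A fold that adds a constant k at each element adds k * length overall.
theorem foldl_add_const (xs : List Int) (init k : Int) :
    xs.foldl (fun c _ => c + k) init = init + k * xs.length := by
  induction xs generalizing init with
  | nil => simp
  | cons x t ih => simp [List.foldl, ih]; ring

-- The body of A's outer loop adds exactly 624 to the accumulator.
theorem inner_body (c : Int) :
    (PySem.List.pyRange 0 16 1).foldl
      (fun c2 _ =>
        (PySem.List.pyRange 0 39 1).foldl (fun c3 _ => c3 + 1) c2)
      c = c + 624 := by
  have h39 : ∀ c2 : Int,
      (PySem.List.pyRange 0 39 1).foldl (fun c3 _ => c3 + 1) c2 = c2 + 39 := by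
    intro c2
    have := foldl_add_const (PySem.List.pyRange 0 39 1) c2 1
    simpa [PySem.List.length_pyRange_one] using this
  have : (PySem.List.pyRange 0 16 1).foldl
      (fun c2 _ =>
        (PySem.List.pyRange 0 39 1).foldl (fun c3 _ => c3 + 1) c2)
      c = (PySem.List.pyRange 0 16 1).foldl (fun c2 _ => c2 + 39) c := by
    apply PySem.List.foldl_congr_mem
    intro a x _; exact h39 a
  rw [this]
  have := foldl_add_const (PySem.List.pyRange 0 16 1) c 39
  simpa [PySem.List.length_pyRange_one] using this

-- ===== VERDICT (by name: the statement is the Claim_ definition above) =====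
theorem CountClausesInRoundFunction_spec : Claim_equal_CountClausesInRoundFunction := by
  intro Round ActiveSbox clause_num _
  unfold Spec_CountClausesInRoundFunction CountClausesInRoundFunction CountClausesInRoundFunction_alt
  have hcong : (PySem.List.pyRange 0 Round 1).foldl
      (fun c _ =>
        (PySem.List.pyRange 0 16 1).foldl
          (fun c2 _ =>
            (PySem.List.pyRange 0 39 1).foldl (fun c3 _ => c3 + 1) c2)
          c)
      (clause_num + 1)
      = (PySem.List.pyRange 0 Round 1).foldl (fun c _ => c + 624) (clause_num + 1) := by
    apply PySem.List.foldl_congr_mem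
    intro a x _; exact inner_body a
  rw [hcong, foldl_add_const, PySem.List.length_pyRange_one]
  have : ((Round - 0).toNat : Int) = max Round 0 := by omega
  rw [this]
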